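-- pv_equiv track=rewrite | github.com/emaric/advent-of-code | 2025/solutions/day3.py | get_next_sub_array
-- ===== SOURCE A (Python) =====
-- def get_next_sub_array(arr, remaining_right_length, orig_arr=None):
--     max_value = max(arr)
--     max_idx = arr.index(max_value)
--     if orig_arr is None:
--         orig_arr = [n for n in arr]
--
--     right_arr = orig_arr[max_idx + 1 :]
--     if len(right_arr) >= remaining_right_length - 1:
--         return max_value, right_arr
--     else:
--         left_arr = orig_arr[:max_idx]
--         if len(left_arr) <= 0:
--             max_left = max_value
--         else:
--             max_left, _ = get_next_sub_array(left_arr, remaining_right_length, orig_arr)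
--         max_left_idx = orig_arr.index(max_left)
--         remaining_arr = orig_arr[max_left_idx + 1 :]
--         return max_left, remaining_arr
-- ===== SOURCE B (Python) =====
-- def get_next_sub_array(arr, remaining_right_length, orig_arr=None):
--     max_value = max(arr)
--     max_idx = arr.index(max_value)
--     o = list(arr) if orig_arr is None else orig_arr
--     if max(0, len(o) - (max_idx + 1)) >= remaining_right_length - 1:
--         return max_value, o[max_idx + 1:]
--     left = o[:max_idx]
--     if not left:
--         j = o.index(max_value)
--         return max_value, o[j + 1:]
--     # The recursion of A, unrolled: it walks the strict left-to-right records of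
--     # the prefix `left` from right to left and stops at the first whose suffix in
--     # `o` is long enough, i.e. at the rightmost record position <= len(o) - r
--     # (defaulting to position 0, itself always a record).  One forward pass finds it.
--     t = len(o) - remaining_right_length
--     cur = left[0]
--     ans = 0
--     for j in range(1, len(left)):
--         if left[j] > cur:
--             cur = left[j]
--             if j <= t:
--                 ans = j
--     return o[ans], o[ans + 1:]
-- ===== Notes on version B (the rewrite author's own statement) =====
-- stated objective: alternative
-- what changed: Replaces A's recursion over shrinking prefixes (each level re-computing max, slices and orig_arr.index) with one forward pass that finds the rightmost strict left-to-right record of the eligible prefix whose suffix is long enough.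
import Mathlib
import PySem

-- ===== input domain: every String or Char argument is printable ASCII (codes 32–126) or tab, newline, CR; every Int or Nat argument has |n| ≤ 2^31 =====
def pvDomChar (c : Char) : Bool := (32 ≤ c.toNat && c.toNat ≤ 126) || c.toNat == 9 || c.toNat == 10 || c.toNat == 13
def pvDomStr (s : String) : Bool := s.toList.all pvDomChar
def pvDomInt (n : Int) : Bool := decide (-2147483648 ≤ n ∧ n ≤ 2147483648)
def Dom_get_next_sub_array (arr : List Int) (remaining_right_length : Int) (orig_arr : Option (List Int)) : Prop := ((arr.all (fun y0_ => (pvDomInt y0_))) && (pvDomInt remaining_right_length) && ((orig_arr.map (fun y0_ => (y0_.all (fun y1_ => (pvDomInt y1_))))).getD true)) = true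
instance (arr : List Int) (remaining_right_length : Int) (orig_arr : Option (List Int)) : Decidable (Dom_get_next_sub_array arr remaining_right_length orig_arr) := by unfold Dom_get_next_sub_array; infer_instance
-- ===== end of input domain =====

-- B replaces A's recursion over shrinking prefixes by a single forward pass that
-- finds the rightmost strict left-to-right record of the eligible prefix; objective: alternative.

-- ===== PORT A =====
-- Literal port of A's recursion. Python's max([]) / list.index on a missing element raise
-- ValueError; there the port returns junk via `.getD 0` / idxOf's length default — those
-- inputs are excluded by Pre_get_next_sub_array.
def get_next_sub_array (arr : List Int) (remaining_right_length : Int) (orig_arr : Option (List Int)) : Int × List Int :=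
  let max_value := (arr.max?).getD 0
  let max_idx := List.idxOf max_value arr
  let o := orig_arr.getD arr
  let right_arr := o.drop (max_idx + 1)
  if (remaining_right_length - 1 : Int) ≤ (right_arr.length : Int) then
    (max_value, right_arr)
  else
    let left_arr := o.take max_idx
    let max_left :=
      if left_arr.length ≤ 0 then max_value
      else (get_next_sub_array left_arr remaining_right_length (some o)).1
    let max_left_idx := List.idxOf max_left o
    (max_left, o.drop (max_left_idx + 1))
termination_by arr.length
decreasing_by
  rename_i h1 h2
  have hpos : 0 < left_arr.length := by omega
  have hlen : left_arr.length ≤ max_idx := by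
    simp [left_arr, List.length_take]
  have harr : arr ≠ [] := by
    intro he
    subst he
    simp [max_idx, left_arr] at hpos
  have hmem : max_value ∈ arr := by
    cases hmax : arr.max? with
    | none => exact absurd (List.max?_eq_none_iff.mp hmax) harr
    | some v =>
      have := List.max?_mem hmax
      simpa [max_value, hmax] using this
  exact Nat.lt_of_le_of_lt hlen (List.idxOf_lt_length_of_mem hmem)

-- ===== PORT B =====
-- One step of Source B's for-loop: state (cur, ans); left[j] is in range, ported as getD.
def pvRecStep (t : Int) (left : List Int) (s : Int × Nat) (j : Nat) : Int × Nat :=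
  if s.1 < left.getD j 0 then
    (left.getD j 0, if (j : Int) ≤ t then j else s.2)
  else s

-- Port of Source B; `range(1, len(left))` is ported as `List.range' 1 (left.length - 1)`.
def get_next_sub_array_alt (arr : List Int) (remaining_right_length : Int) (orig_arr : Option (List Int)) : Int × List Int :=
  let max_value := (arr.max?).getD 0
  let max_idx := List.idxOf max_value arr
  let o := orig_arr.getD arr
  if remaining_right_length - 1 ≤ max 0 ((o.length : Int) - (max_idx + 1)) then
    (max_value, o.drop (max_idx + 1))
  else
    let left := o.take max_idx
    if left = [] then
      let j := List.idxOf max_value o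
      (max_value, o.drop (j + 1))
    else
      let t := (o.length : Int) - remaining_right_length
      let st := (List.range' 1 (left.length - 1)).foldl (pvRecStep t left) (left.getD 0 0, 0)
      (o.getD st.2 0, o.drop (st.2 + 1))

-- ===== PRECONDITION & SPEC =====
-- Pre_ excludes exactly the inputs on which Python A raises: empty `arr` (max([]) raises
-- ValueError), and explicit-orig_arr calls whose top level reaches the empty-left-prefix
-- branch with max(arr) absent from orig_arr (orig_arr.index raises ValueError).
-- When orig_arr is none the second conjunct is vacuous (max(arr) ∈ arr).
def Pre_get_next_sub_array (arr : List Int) (remaining_right_length : Int) (orig_arr : Option (List Int)) : Prop :=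
  arr ≠ [] ∧
  (remaining_right_length - 1 ≤ (((orig_arr.getD arr).drop (List.idxOf ((arr.max?).getD 0) arr + 1)).length : Int)
    ∨ (orig_arr.getD arr).take (List.idxOf ((arr.max?).getD 0) arr) ≠ []
    ∨ ((arr.max?).getD 0) ∈ (orig_arr.getD arr))
instance (arr : List Int) (remaining_right_length : Int) (orig_arr : Option (List Int)) : Decidable (Pre_get_next_sub_array arr remaining_right_length orig_arr) := by unfold Pre_get_next_sub_array; infer_instance

def pvWitness_get_next_sub_array : List Int × Int × Option (List Int) := ([3, 1, 2], 2, none)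

def Spec_get_next_sub_array (arr : List Int) (remaining_right_length : Int) (orig_arr : Option (List Int)) (out : Int × List Int) : Prop := out = get_next_sub_array_alt arr remaining_right_length orig_arr
instance (arr : List Int) (remaining_right_length : Int) (orig_arr : Option (List Int)) (out : Int × List Int) : Decidable (Spec_get_next_sub_array arr remaining_right_length orig_arr out) := by unfold Spec_get_next_sub_array; infer_instance

-- ===== CLAIM (what is proved, stated in full; the proofs are below) =====
def Claim_equal_get_next_sub_array : Prop := ∀ (arr : List Int) (remaining_right_length : Int) (orig_arr : Option (List Int)), Dom_get_next_sub_array arr remaining_right_length orig_arr → Pre_get_next_sub_array arr remaining_right_length orig_arr → Spec_get_next_sub_array arr remaining_right_length orig_arr (get_next_sub_array arr remaining_right_length orig_arr)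

-- ===== LEMMAS AND PROOFS =====

-- j is a strict left-to-right record position of o
def recAtB (o : List Int) (j : Nat) : Bool :=
  decide (j < o.length) && (List.range j).all (fun k => decide (o.getD k 0 < o.getD j 0))

-- largest record position < p with position ≤ t, defaulting to 0
def bestRec (o : List Int) (t : Int) : Nat → Nat
  | 0 => 0
  | p + 1 => if recAtB o p && decide ((p : Int) ≤ t) then p else bestRec o t p

theorem recAtB_iff (o : List Int) (j : Nat) :
    recAtB o j = true ↔ (j < o.length ∧ ∀ k, k < j → o.getD k 0 < o.getD j 0) := by
  simp [recAtB, List.mem_range]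

theorem bestRec_skip (o : List Int) (t : Int) (p q : Nat) (hq : q ≤ p)
    (h : ∀ k, q ≤ k → k < p → ¬(recAtB o k = true ∧ (k : Int) ≤ t)) :
    bestRec o t p = bestRec o t q := by
  induction p with
  | zero =>
    have : q = 0 := Nat.le_zero.mp hq
    rw [this]
  | succ p IH =>
    rcases Nat.eq_or_lt_of_le hq with he | hl
    · rw [he]
    · have hp : q ≤ p := by omega
      rw [bestRec]
      have hk := h p hp (by omega)
      rw [if_neg (by simpa using hk)]
      exact IH hp (fun k h1 h2 => h k h1 (by omega))

theorem bestRec_zero_or_rec (o : List Int) (t : Int) (p : Nat) :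
    bestRec o t p = 0 ∨ (recAtB o (bestRec o t p) = true ∧ (bestRec o t p : Int) ≤ t) := by
  induction p with
  | zero => left; rfl
  | succ p IH =>
    rw [bestRec]
    split_ifs with h
    · right; simpa using h
    · exact IH

theorem recAtB_zero (o : List Int) (ho : o ≠ []) : recAtB o 0 = true := by
  rw [recAtB_iff]
  exact ⟨List.length_pos_of_ne_nil ho, fun k hk => by omega⟩

-- first occurrence: at a record position, idxOf of the value is that position
theorem idxOf_at_record (o : List Int) (j : Nat) (hj : j < o.length)
    (h : ∀ k, k < j → o.getD k 0 < o.getD j 0) :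
    List.idxOf (o.getD j 0) o = j := by
  induction o generalizing j with
  | nil => simp at hj
  | cons a l IH =>
    cases j with
    | zero => simp
    | succ j =>
      have hlt : a < l.getD j 0 := by
        have := h 0 (by omega)
        simpa using this
      have ha : (a == l.getD j 0) = false := by
        simp only [beq_eq_false_iff_ne, ne_eq]
        omega
      have hIH := IH j (by simpa using hj) (fun k hk => by
        have := h (k + 1) (by omega)
        simpa using this)
      simp only [List.getD_cons_succ, List.idxOf_cons, ha, cond_false]
      omega

-- max/idxOf facts for a nonempty list
theorem argmax_facts (l : List Int) (hl : l ≠ []) :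
    let m := (l.max?).getD 0
    let j := List.idxOf m l
    j < l.length ∧ l.getD j 0 = m ∧ (∀ k, k < j → l.getD k 0 < m) ∧
      (∀ k, j < k → k < l.length → l.getD k 0 ≤ m) := by
  intro m j
  have hmem : m ∈ l := by
    cases hmax : l.max? with
    | none => exact absurd (List.max?_eq_none_iff.mp hmax) hl
    | some v =>
      have := List.max?_mem hmax
      simpa [m, hmax] using this
  have hle : ∀ x ∈ l, x ≤ m := by
    intro x hx
    cases hmax : l.max? with
    | none => exact absurd (List.max?_eq_none_iff.mp hmax) hl
    | some v =>
      have := (List.max?_eq_some_iff.mp hmax).2 x hx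
      simpa [m, hmax] using this
  have hjlt : j < l.length := List.idxOf_lt_length_of_mem hmem
  have hval : l.getD j 0 = m := by
    have := List.getElem_idxOf (x := m) (xs := l) hjlt
    rw [List.getD_eq_getElem l 0 hjlt]
    exact this
  refine ⟨hjlt, hval, ?_, ?_⟩
  · intro k hk
    have hklt : k < l.length := by omega
    have hne : l.getD k 0 ≠ m := by
      rw [List.getD_eq_getElem l 0 hklt]
      intro he
      have hmem2 : m ∈ l.take (k + 1) := by
        rw [← he]
        have hk2 : k < (l.take (k + 1)).length := by
          simp [List.length_take]
          omega
        have := List.getElem_mem hk2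
        simpa using this
      have hsplit : List.idxOf m l = List.idxOf m (l.take (k + 1)) := by
        conv_lhs => rw [← List.take_append_drop (k + 1) l]
        rw [List.idxOf_append, if_pos hmem2]
      have : List.idxOf m (l.take (k + 1)) < (l.take (k + 1)).length :=
        List.idxOf_lt_length_of_mem hmem2
      have hlen : (l.take (k + 1)).length ≤ k + 1 := by simp [List.length_take]
      have : j ≤ k := by
        have : j = List.idxOf m (l.take (k + 1)) := hsplit
        omega
      omega
    have : l.getD k 0 ≤ m := by
      rw [List.getD_eq_getElem l 0 hklt]
      exact hle _ (List.getElem_mem hklt)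
    omega
  · intro k h1 h2
    rw [List.getD_eq_getElem l 0 h2]
    exact hle _ (List.getElem_mem h2)

-- getD transfers along take
theorem getD_take (o : List Int) (i k : Nat) (hk : k < i) :
    (o.take i).getD k 0 = o.getD k 0 := by
  by_cases h : k < o.length
  · rw [List.getD_eq_getElem _ 0 (by simp [List.length_take]; omega),
        List.getD_eq_getElem _ 0 h]
    simp
  · rw [List.getD_eq_default _ 0 (by simp [List.length_take]; omega),
        List.getD_eq_default _ 0 (by omega)]

theorem recAtB_take (o : List Int) (i k : Nat) (hk : k < i) :
    recAtB (o.take i) k = recAtB o k := by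
  by_cases hko : k < o.length
  · have h1 : recAtB (o.take i) k = true ↔ recAtB o k = true := by
      rw [recAtB_iff, recAtB_iff]
      constructor
      · rintro ⟨h, hall⟩
        exact ⟨hko, fun a ha => by
          rw [← getD_take o i a (by omega), ← getD_take o i k hk]; exact hall a ha⟩
      · rintro ⟨h, hall⟩
        refine ⟨by simp [List.length_take]; omega, fun a ha => ?_⟩
        rw [getD_take o i a (by omega), getD_take o i k hk]; exact hall a ha
    cases hb : recAtB o k
    · cases hb2 : recAtB (o.take i) k
      · rfl
      · exact absurd (hb ▸ h1.mp hb2) (by simp)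
    · exact h1.mpr hb
  · have : ¬ k < (o.take i).length := by simp [List.length_take]; omega
    cases hb : recAtB (o.take i) k
    · cases hb2 : recAtB o k
      · rfl
      · exact absurd ((recAtB_iff o k).mp hb2).1 hko
    · exact absurd ((recAtB_iff _ k).mp hb).1 this

theorem bestRec_take (o : List Int) (t : Int) (i : Nat) :
    ∀ q, q ≤ i → bestRec (o.take i) t q = bestRec o t q := by
  intro q
  induction q with
  | zero => intro _; rfl
  | succ q IH =>
    intro hq
    rw [bestRec, bestRec, recAtB_take o i q (by omega), IH (by omega)]

-- the fold of B computes bestRec on left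
theorem fold_invariant (l : List Int) (t : Int) :
    ∀ k, k + 1 ≤ l.length →
      (∀ a, a ≤ k → l.getD a 0 ≤ ((List.range' 1 k).foldl (pvRecStep t l) (l.getD 0 0, 0)).1) ∧
      (∃ jr, jr ≤ k ∧ l.getD jr 0 = ((List.range' 1 k).foldl (pvRecStep t l) (l.getD 0 0, 0)).1) ∧
      ((List.range' 1 k).foldl (pvRecStep t l) (l.getD 0 0, 0)).2 = bestRec l t (k + 1) := by
  intro k
  induction k with
  | zero =>
    intro _
    refine ⟨fun a ha => ?_, ⟨0, le_refl 0, rfl⟩, ?_⟩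
    · have : a = 0 := Nat.le_zero.mp ha
      simp [this]
    · show (0 : Nat) = bestRec l t 1
      rw [bestRec]
      split_ifs <;> rfl
  | succ k IH =>
    intro hk1
    obtain ⟨IH1, ⟨jr, hjr, hjv⟩, IH3⟩ := IH (by omega)
    have hconc : List.range' 1 (k + 1) = List.range' 1 k ++ [1 + 1 * k] := List.range'_concat
    have h1k : 1 + 1 * k = k + 1 := by omega
    rw [hconc, h1k, List.foldl_append]
    set s := (List.range' 1 k).foldl (pvRecStep t l) (l.getD 0 0, 0) with hs
    simp only [List.foldl_cons, List.foldl_nil]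
    have hrec : recAtB l (k + 1) = true ↔ s.1 < l.getD (k + 1) 0 := by
      rw [recAtB_iff]
      constructor
      · rintro ⟨h, hall⟩
        calc s.1 = l.getD jr 0 := hjv.symm
          _ < l.getD (k + 1) 0 := hall jr (by omega)
      · intro h
        refine ⟨by omega, fun a ha => ?_⟩
        calc l.getD a 0 ≤ s.1 := IH1 a (by omega)
          _ < l.getD (k + 1) 0 := h
    by_cases hcmp : s.1 < l.getD (k + 1) 0
    · rw [pvRecStep, if_pos hcmp]
      refine ⟨fun a ha => ?_, ⟨k + 1, le_refl _, rfl⟩, ?_⟩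
      · rcases Nat.lt_or_ge a (k + 1) with h | h
        · exact le_of_lt (lt_of_le_of_lt (IH1 a (by omega)) hcmp)
        · have : a = k + 1 := by omega
          simp [this]
      · show (if ((k + 1 : Nat) : Int) ≤ t then (k + 1) else s.2) = bestRec l t (k + 1 + 1)
        rw [bestRec]
        have hr : recAtB l (k + 1) = true := hrec.mpr hcmp
        simp only [hr, Bool.true_and, decide_eq_true_eq]
        split_ifs with h1
        · rfl
        · exact IH3
    · rw [pvRecStep, if_neg hcmp]
      refine ⟨fun a ha => ?_, ⟨jr, by omega, hjv⟩, ?_⟩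
      · rcases Nat.lt_or_ge a (k + 1) with h | h
        · exact IH1 a (by omega)
        · have : a = k + 1 := by omega
          subst this
          omega
      · have hnr : recAtB l (k + 1) = false := by
          cases hb : recAtB l (k + 1)
          · rfl
          · exact absurd (hrec.mp hb) hcmp
        rw [bestRec]
        simp only [hnr, Bool.false_and, if_neg, Bool.false_eq_true, not_false_iff]
        exact IH3

-- characterization of A's recursion on a nonempty prefix of o
theorem A_char (o : List Int) (r : Int) :
    ∀ p, 1 ≤ p → p ≤ o.length →
      get_next_sub_array (o.take p) r (some o)
        = (o.getD (bestRec o ((o.length : Int) - r) p) 0,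
           o.drop (bestRec o ((o.length : Int) - r) p + 1)) := by
  intro p
  induction p using Nat.strong_induction_on with
  | _ p IH =>
    intro hp1 hp2
    have hne : o.take p ≠ [] := by
      intro h
      have h2 : (o.take p).length = 0 := by rw [h]; rfl
      rw [List.length_take] at h2
      omega
    obtain ⟨hjlt, hjval, hjbefore, hjafter⟩ := argmax_facts (o.take p) hne
    set t := (o.length : Int) - r with ht
    set m := ((o.take p).max?).getD 0 with hm
    set j := List.idxOf m (o.take p) with hj
    have hlt : (o.take p).length = p := by rw [List.length_take]; omega
    have hjp : j < p := by rw [← hlt]; exact hjlt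
    have hjo : j < o.length := by omega
    have hojval : o.getD j 0 = m := by rw [← getD_take o p j hjp]; exact hjval
    have hobefore : ∀ k, k < j → o.getD k 0 < m := fun k hk => by
      rw [← getD_take o p k (by omega)]; exact hjbefore k hk
    have hoafter : ∀ k, j < k → k < p → o.getD k 0 ≤ m := fun k h1 h2 => by
      rw [← getD_take o p k h2]; exact hjafter k h1 (by omega)
    have hnorec : ∀ k, j < k → k < p → recAtB o k = false := by
      intro k h1 h2
      cases hb : recAtB o k
      · rfl
      · obtain ⟨_, hall⟩ := (recAtB_iff o k).mp hb
        have := hall j h1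
        have := hoafter k h1 h2
        omega
    have hrecj : recAtB o j = true := (recAtB_iff o j).mpr ⟨hjo, fun k hk => hojval ▸ hobefore k hk⟩
    have hdrop : ((o.drop (j + 1)).length : Int) = (o.length : Int) - ((j : Int) + 1) := by
      rw [List.length_drop]
      omega
    have key : get_next_sub_array (o.take p) r (some o)
        = (if (r - 1 : Int) ≤ ((o.drop (j + 1)).length : Int) then
             (m, o.drop (j + 1))
           else
             let ml := if (o.take j).length ≤ 0 then m
                       else (get_next_sub_array (o.take j) r (some o)).1
             (ml, o.drop (List.idxOf ml o + 1))) := by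
      rw [get_next_sub_array]
      rfl
    rw [key]
    split_ifs with hc hc2
    · -- eligible suffix at j: bestRec picks j
      have hjt : (j : Int) ≤ t := by rw [ht]; omega
      have hb : bestRec o t p = j := by
        rw [bestRec_skip o t p (j + 1) (by omega)
            (fun k h1 h2 => by simp [hnorec k (by omega) h2])]
        rw [bestRec, if_pos (by rw [hrecj]; simpa using hjt)]
      rw [hb, hojval]
    · -- empty left prefix: j = 0, bestRec defaults to 0
      have hj0 : j = 0 := by
        rw [List.length_take] at hc2
        omega
      have hjt : ¬ (j : Int) ≤ t := by rw [ht]; omega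
      have hbest : bestRec o t p = 0 := by
        rw [bestRec_skip o t p (j + 1) (by omega)
            (fun k h1 h2 => by simp [hnorec k (by omega) h2])]
        rw [bestRec, if_neg (by
          simp only [Bool.and_eq_true, decide_eq_true_eq, not_and]
          intro _ h
          exact hjt h)]
        rw [hj0, bestRec]
      have hidx : List.idxOf m o = 0 := by
        have := idxOf_at_record o j hjo (fun k hk => hojval ▸ hobefore k hk)
        rw [hojval] at this
        omega
      dsimp only
      rw [hbest, hidx]
      rw [hj0] at hojval
      rw [← hojval]
    · -- recurse on the prefix before j
      have hjpos : 1 ≤ j := by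
        rw [List.length_take] at hc2
        omega
      have hjt : ¬ (j : Int) ≤ t := by rw [ht]; omega
      dsimp only
      rw [IH j hjp hjpos (by omega)]
      have hbs : bestRec o t p = bestRec o t j := by
        rw [bestRec_skip o t p (j + 1) (by omega)
            (fun k h1 h2 => by simp [hnorec k (by omega) h2])]
        rw [bestRec, if_neg (by
          simp only [Bool.and_eq_true, decide_eq_true_eq, not_and]
          intro _ h
          exact hjt h)]
      have hrecq : recAtB o (bestRec o t j) = true := by
        rcases bestRec_zero_or_rec o t j with h | h
        · rw [h]; exact recAtB_zero o (by intro he; subst he; simp at hjo)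
        · exact h.1
      obtain ⟨hqlt, hqall⟩ := (recAtB_iff o _).mp hrecq
      dsimp only
      rw [idxOf_at_record o _ hqlt hqall, hbs]

-- ===== VERDICT (by name: the statement is the Claim_ definition above) =====
theorem get_next_sub_array_spec : Claim_equal_get_next_sub_array := by
  intro arr r orig _ _
  unfold Spec_get_next_sub_array
  set m := (arr.max?).getD 0 with hm
  set i := List.idxOf m arr with hi
  set o := orig.getD arr with ho
  have hdl : ((o.drop (i + 1)).length : Int) = max 0 ((o.length : Int) - ((i : Nat) + 1)) := by
    rw [List.length_drop]
    omega
  have keyA : get_next_sub_array arr r orig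
      = (if (r - 1 : Int) ≤ ((o.drop (i + 1)).length : Int) then
           (m, o.drop (i + 1))
         else
           let ml := if (o.take i).length ≤ 0 then m
                     else (get_next_sub_array (o.take i) r (some o)).1
           (ml, o.drop (List.idxOf ml o + 1))) := by
    rw [get_next_sub_array]
  have keyB : get_next_sub_array_alt arr r orig
      = (if r - 1 ≤ max 0 ((o.length : Int) - ((i : Nat) + 1)) then
           (m, o.drop (i + 1))
         else if o.take i = [] then
           (m, o.drop (List.idxOf m o + 1))
         else
           let st := (List.range' 1 ((o.take i).length - 1)).foldl
             (pvRecStep ((o.length : Int) - r) (o.take i)) ((o.take i).getD 0 0, 0)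
           (o.getD st.2 0, o.drop (st.2 + 1))) := by
    rw [get_next_sub_array_alt]
  rw [keyA, keyB, ← hdl]
  split_ifs with hc hc2 hc3
  · rfl
  · -- A: empty-left branch; B: left = [] branch — same expression
    rfl
  · exact absurd (List.length_eq_zero_iff.mp (Nat.le_zero.mp hc2)) hc3
  · rename_i hc3'
    exact absurd (by simp [hc3']) hc2
  · -- left nonempty: A recursion (A_char) vs B fold (fold_invariant)
    rename_i hleft
    have hp' : (o.take i).length = min i o.length := by rw [List.length_take]
    set p := min i o.length with hp
    have htake : o.take i = o.take p := by rw [hp, ← List.take_take, List.take_length]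
    have hp2 : p ≤ o.length := by omega
    have hp1 : 1 ≤ p := by
      by_contra h
      exact hleft (List.length_eq_zero_iff.mp (by omega))
    set t := (o.length : Int) - r with ht
    rw [htake]
    dsimp only
    rw [A_char o r p hp1 hp2, ← ht]
    obtain ⟨_, _, hfold⟩ := fold_invariant (o.take p) t ((o.take p).length - 1) (by
      rw [List.length_take]
      omega)
    have hlen1 : (o.take p).length - 1 + 1 = p := by
      rw [List.length_take]
      omega
    rw [hlen1] at hfold
    rw [hfold, bestRec_take o t p p (by omega)]
    have hrecq : recAtB o (bestRec o t p) = true := by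
      rcases bestRec_zero_or_rec o t p with h | h
      · rw [h]
        exact recAtB_zero o (by
          intro he
          rw [he] at hp2
          simp at hp2
          omega)
      · exact h.1
    obtain ⟨hqlt, hqall⟩ := (recAtB_iff o _).mp hrecq
    rw [idxOf_at_record o _ hqlt hqall]
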